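-- pv_equiv track=rewrite | github.com/365cent/glide | src/smote_oversampling.py | _create_default_hierarchy
-- ===== SOURCE A (Python) =====
-- from typing import Dict, List, Tuple, Optional, Union
--
-- def _create_default_hierarchy(attack_types: List[str]) -> Dict:
--     """
--     Create a default attack hierarchy based on common patterns.
--
--     Args:
--         attack_types: List of attack type names
--
--     Returns:
--         Hierarchy dictionary
--     """
--     hierarchy = {
--         'level_1': {
--             'web_attacks': [attack for attack in attack_types if any(web_term in attack.lower()
--                            for web_term in ['xss', 'sql', 'injection', 'csrf', 'lfi', 'rfi'])],
--             'network_attacks': [attack for attack in attack_types if any(net_term in attack.lower()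
--                                for net_term in ['dos', 'ddos', 'scan', 'brute', 'flood'])],
--             'system_attacks': [attack for attack in attack_types if any(sys_term in attack.lower()
--                               for sys_term in ['privilege', 'escalation', 'backdoor', 'trojan'])],
--             'data_attacks': [attack for attack in attack_types if any(data_term in attack.lower()
--                             for data_term in ['exfiltration', 'leak', 'theft', 'breach'])]
--         }
--     }
--
--     # Add remaining attacks to 'other' category
--     categorized_attacks = set()
--     for group in hierarchy['level_1'].values():
--         categorized_attacks.update(group)
--
--     remaining_attacks = [attack for attack in attack_types if attack not in categorized_attacks]
--     if remaining_attacks: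
--         hierarchy['level_1']['other'] = remaining_attacks
--
--     return hierarchy
-- ===== SOURCE B (Python) =====
-- def _create_default_hierarchy(attack_types):
--     web, net, sys_, data, other = [], [], [], [], []
--     for attack in attack_types:
--         lower = attack.lower()
--         matched = False
--         if any(t in lower for t in ('xss', 'sql', 'injection', 'csrf', 'lfi', 'rfi')):
--             web.append(attack); matched = True
--         if any(t in lower for t in ('dos', 'ddos', 'scan', 'brute', 'flood')):
--             net.append(attack); matched = True
--         if any(t in lower for t in ('privilege', 'escalation', 'backdoor', 'trojan')):
--             sys_.append(attack); matched = True
--         if any(t in lower for t in ('exfiltration', 'leak', 'theft', 'breach')):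
--             data.append(attack); matched = True
--         if not matched:
--             other.append(attack)
--     level_1 = {'web_attacks': web, 'network_attacks': net,
--                'system_attacks': sys_, 'data_attacks': data}
--     if other:
--         level_1['other'] = other
--     return {'level_1': level_1}
-- ===== Notes on version B (the rewrite author's own statement) =====
-- stated objective: simpler
-- what changed: Replaces A's four independent list comprehensions plus a separate set-collection-and-rescan pass for 'other' with a single loop over attack_types that appends each attack to every matching bucket and uses a matched flag for 'other'.
import Mathlib
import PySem

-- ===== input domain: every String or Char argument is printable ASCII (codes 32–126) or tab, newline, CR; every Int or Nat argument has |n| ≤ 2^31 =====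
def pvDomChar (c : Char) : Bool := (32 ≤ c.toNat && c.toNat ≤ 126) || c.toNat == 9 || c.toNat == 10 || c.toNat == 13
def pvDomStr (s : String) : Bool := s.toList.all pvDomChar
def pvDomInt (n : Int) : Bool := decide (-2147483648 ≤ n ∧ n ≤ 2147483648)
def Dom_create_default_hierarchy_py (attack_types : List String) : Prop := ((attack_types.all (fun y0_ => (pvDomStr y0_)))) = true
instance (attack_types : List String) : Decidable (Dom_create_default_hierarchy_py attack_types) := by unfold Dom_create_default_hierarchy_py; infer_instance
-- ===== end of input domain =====

-- ===== PORT A =====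
-- header: B folds the categorisation into one pass with a matched flag instead of A's
-- four comprehensions plus a set pass; objective: simpler.
def pvWebTerms : List String := ["xss", "sql", "injection", "csrf", "lfi", "rfi"]
def pvNetTerms : List String := ["dos", "ddos", "scan", "brute", "flood"]
def pvSysTerms : List String := ["privilege", "escalation", "backdoor", "trojan"]
def pvDataTerms : List String := ["exfiltration", "leak", "theft", "breach"]

-- any(term in attack.lower() for term in terms)
def pvAnyTerm (terms : List String) (attack : String) : Bool :=
  terms.any (fun t => PySem.Str.isIn t (PySem.Str.lower attack))

def create_default_hierarchy_py (attack_types : List String) : List (String × List (String × List String)) :=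
  let web := attack_types.filter (fun a => pvAnyTerm pvWebTerms a)
  let net := attack_types.filter (fun a => pvAnyTerm pvNetTerms a)
  let sys := attack_types.filter (fun a => pvAnyTerm pvSysTerms a)
  let data := attack_types.filter (fun a => pvAnyTerm pvDataTerms a)
  let level1 : List (String × List String) :=
    [("web_attacks", web), ("network_attacks", net), ("system_attacks", sys), ("data_attacks", data)]
  -- categorized_attacks = set(); for group in values: categorized_attacks.update(group)
  let categorized : PySem.Set String :=
    (level1.map Prod.snd).foldl (fun s g => PySem.Set.update s g) PySem.Set.empty
  let remaining := attack_types.filter (fun a => !(PySem.Set.contains categorized a))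
  let level1' := if remaining.isEmpty then level1 else level1 ++ [("other", remaining)]
  [("level_1", level1')]

-- ===== PORT B =====
-- loop body of Source B: one attack, the five accumulator lists
def pvAltStep (st : List String × List String × List String × List String × List String)
    (attack : String) : List String × List String × List String × List String × List String :=
  let lower := PySem.Str.lower attack
  let (web, net, sys, data, other) := st
  let m1 := pvWebTerms.any (fun t => PySem.Str.isIn t lower)
  let m2 := pvNetTerms.any (fun t => PySem.Str.isIn t lower)
  let m3 := pvSysTerms.any (fun t => PySem.Str.isIn t lower)
  let m4 := pvDataTerms.any (fun t => PySem.Str.isIn t lower)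
  let web := if m1 then web ++ [attack] else web
  let net := if m2 then net ++ [attack] else net
  let sys := if m3 then sys ++ [attack] else sys
  let data := if m4 then data ++ [attack] else data
  let other := if !(m1 || m2 || m3 || m4) then other ++ [attack] else other
  (web, net, sys, data, other)

def create_default_hierarchy_py_alt (attack_types : List String) : List (String × List (String × List String)) :=
  let st := attack_types.foldl pvAltStep ([], [], [], [], [])
  let (web, net, sys, data, other) := st
  let level1 : List (String × List String) :=
    [("web_attacks", web), ("network_attacks", net), ("system_attacks", sys), ("data_attacks", data)]
  let level1' := if other.isEmpty then level1 else level1 ++ [("other", other)]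
  [("level_1", level1')]

-- ===== PRECONDITION & SPEC =====
def Spec_create_default_hierarchy_py (attack_types : List String) (out : List (String × List (String × List String))) : Prop := out = create_default_hierarchy_py_alt attack_types
instance (attack_types : List String) (out : List (String × List (String × List String))) : Decidable (Spec_create_default_hierarchy_py attack_types out) := by unfold Spec_create_default_hierarchy_py; infer_instance

-- ===== CLAIM (what is proved, stated in full; the proofs are below) =====
def Claim_equal_create_default_hierarchy_py : Prop := ∀ (attack_types : List String), Dom_create_default_hierarchy_py attack_types → Spec_create_default_hierarchy_py attack_types (create_default_hierarchy_py attack_types)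

-- ===== LEMMAS AND PROOFS =====

-- one step of B's loop, written with A's predicate helper (definitional)
theorem pvAltStep_eq (w n s d o : List String) (x : String) :
    pvAltStep (w, n, s, d, o) x =
      (if pvAnyTerm pvWebTerms x then w ++ [x] else w,
       if pvAnyTerm pvNetTerms x then n ++ [x] else n,
       if pvAnyTerm pvSysTerms x then s ++ [x] else s,
       if pvAnyTerm pvDataTerms x then d ++ [x] else d,
       if !(pvAnyTerm pvWebTerms x || pvAnyTerm pvNetTerms x ||
            pvAnyTerm pvSysTerms x || pvAnyTerm pvDataTerms x) then o ++ [x] else o) := rfl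

-- B's loop accumulates exactly the four filters plus the unmatched filter
theorem pvAlt_loop (xs : List String) (w n s d o : List String) :
    xs.foldl pvAltStep (w, n, s, d, o) =
      (w ++ xs.filter (fun a => pvAnyTerm pvWebTerms a),
       n ++ xs.filter (fun a => pvAnyTerm pvNetTerms a),
       s ++ xs.filter (fun a => pvAnyTerm pvSysTerms a),
       d ++ xs.filter (fun a => pvAnyTerm pvDataTerms a),
       o ++ xs.filter (fun a => !(pvAnyTerm pvWebTerms a || pvAnyTerm pvNetTerms a ||
                                  pvAnyTerm pvSysTerms a || pvAnyTerm pvDataTerms a))) := by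
  induction xs generalizing w n s d o with
  | nil => simp
  | cons x xs ih =>
    rw [List.foldl_cons, pvAltStep_eq, ih]
    cases h1 : pvAnyTerm pvWebTerms x <;>
    cases h2 : pvAnyTerm pvNetTerms x <;>
    cases h3 : pvAnyTerm pvSysTerms x <;>
    cases h4 : pvAnyTerm pvDataTerms x <;>
    simp [h1, h2, h3, h4]

-- membership in A's categorized set, for an element of attack_types
theorem pv_mem_categorized (xs : List String) (a : String) (ha : a ∈ xs) :
    (a ∈ ([("web_attacks", xs.filter (fun a => pvAnyTerm pvWebTerms a)),
           ("network_attacks", xs.filter (fun a => pvAnyTerm pvNetTerms a)),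
           ("system_attacks", xs.filter (fun a => pvAnyTerm pvSysTerms a)),
           ("data_attacks", xs.filter (fun a => pvAnyTerm pvDataTerms a))].map
            (Prod.snd (α := String))).foldl (fun s g => PySem.Set.update s g) PySem.Set.empty) ↔
      (pvAnyTerm pvWebTerms a || pvAnyTerm pvNetTerms a ||
       pvAnyTerm pvSysTerms a || pvAnyTerm pvDataTerms a) = true := by
  simp [PySem.Set.mem_update, PySem.Set.empty, List.mem_filter, ha]

-- the 'remaining' filter of A equals B's unmatched filter
theorem pv_remaining_eq (xs : List String) :
    xs.filter (fun a =>
      !(PySem.Set.contains (([("web_attacks", xs.filter (fun a => pvAnyTerm pvWebTerms a)),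
           ("network_attacks", xs.filter (fun a => pvAnyTerm pvNetTerms a)),
           ("system_attacks", xs.filter (fun a => pvAnyTerm pvSysTerms a)),
           ("data_attacks", xs.filter (fun a => pvAnyTerm pvDataTerms a))].map
            (Prod.snd (α := String))).foldl (fun s g => PySem.Set.update s g) PySem.Set.empty) a)) =
      xs.filter (fun a => !(pvAnyTerm pvWebTerms a || pvAnyTerm pvNetTerms a ||
                            pvAnyTerm pvSysTerms a || pvAnyTerm pvDataTerms a)) := by
  apply List.filter_congr
  intro a ha
  have h := pv_mem_categorized xs a ha
  by_cases hm : (pvAnyTerm pvWebTerms a || pvAnyTerm pvNetTerms a ||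
       pvAnyTerm pvSysTerms a || pvAnyTerm pvDataTerms a) = true
  · have hc := (PySem.Set.contains_iff _ a).mpr (h.mpr hm)
    simp only [hc, hm]
  · have hm' := Bool.eq_false_iff.mpr hm
    simp only [hm', Bool.not_false, Bool.not_eq_true']
    rw [Bool.eq_false_iff]
    intro hcc
    exact hm (h.mp ((PySem.Set.contains_iff _ a).mp hcc))

-- ===== VERDICT (by name: the statement is the Claim_ definition above) =====
theorem create_default_hierarchy_py_spec : Claim_equal_create_default_hierarchy_py := by
  intro xs _
  unfold Spec_create_default_hierarchy_py create_default_hierarchy_py create_default_hierarchy_py_alt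
  rw [pvAlt_loop]
  simp only [pv_remaining_eq, List.nil_append]
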